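-- pv_equiv track=rewrite | github.com/rampagingram/sleep-code-1 | Optogenetics analysis.py | trials_by_animal
-- ===== SOURCE A (Python) =====
-- def trials_by_animal(a, TRIALS):
--     ## calculates the trials per animal and returns a trial list
--     b = []
--     start = 0
--     stop = 0
--     num_animals = int(len(TRIALS))
--     for i in range(num_animals):
--         start = stop
--         stop = stop + TRIALS[i]
--         curr_b = a[start:stop]
--         b.append(curr_b)
--     return b
-- ===== SOURCE B (Python) =====
-- def trials_by_animal(a, TRIALS):
--     ## divide and conquer on the trial-count list, carrying the absolute start offset:
--     ## a singleton count yields one slice; otherwise split the counts in half, the right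
--     ## half's chunks start sum(left) elements further on
--     def go(s, ts):
--         if not ts:
--             return []
--         if len(ts) == 1:
--             return [a[s:s + ts[0]]]
--         mid = len(ts) // 2
--         left = ts[:mid]
--         return go(s, left) + go(s + sum(left), ts[mid:])
--     return go(0, TRIALS)
-- ===== Notes on version B (the rewrite author's own statement) =====
-- stated objective: alternative
-- what changed: Replaces A's left-to-right loop with mutable start/stop accumulators by a divide-and-conquer recursion that splits the trial-count list in half and offsets the right half's chunks by sum(left).
import Mathlib
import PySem

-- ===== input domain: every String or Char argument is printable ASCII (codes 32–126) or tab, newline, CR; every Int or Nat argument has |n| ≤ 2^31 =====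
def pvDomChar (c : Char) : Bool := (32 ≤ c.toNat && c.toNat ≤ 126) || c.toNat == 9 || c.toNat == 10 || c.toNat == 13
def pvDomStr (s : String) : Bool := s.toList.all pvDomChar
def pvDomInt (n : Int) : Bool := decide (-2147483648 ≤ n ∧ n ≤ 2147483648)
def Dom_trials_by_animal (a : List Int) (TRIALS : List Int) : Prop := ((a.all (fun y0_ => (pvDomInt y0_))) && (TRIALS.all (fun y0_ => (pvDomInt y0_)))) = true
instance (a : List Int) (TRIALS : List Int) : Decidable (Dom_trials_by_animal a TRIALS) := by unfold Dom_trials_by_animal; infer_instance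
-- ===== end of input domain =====

-- B replaces A's left-to-right loop with mutable start/stop accumulators by a
-- divide-and-conquer recursion on the trial-count list that carries the absolute start
-- offset; the right half's chunks start sum(left) elements further on (objective: alternative).

-- ===== PORT A =====
-- state = (start, stop, b); loop over i in range(len(TRIALS))
def trials_by_animal (a : List Int) (TRIALS : List Int) : List (List Int) :=
  let num_animals : Int := (TRIALS.length : Int)
  let st := (PySem.List.pyRange 0 num_animals 1).foldl
    (fun (st : Int × Int × List (List Int)) i =>
      let start := st.2.1
      let stop := st.2.1 + PySem.List.pyGetD TRIALS i 0   -- TRIALS[i]; i always in range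
      (start, stop, st.2.2 ++ [PySem.List.slice a (some start) (some stop)]))
    (0, 0, [])
  st.2.2

-- ===== PORT B =====
-- go(s, ts): [] -> []; singleton -> [a[s:s+ts[0]]]; else split at mid = len(ts)//2
def tbaGo (a : List Int) (s : Int) (ts : List Int) : List (List Int) :=
  if _h0 : ts = [] then []
  else if _h1 : ts.length = 1 then
    [PySem.List.slice a (some s) (some (s + PySem.List.pyGetD ts 0 0))]   -- ts[0]; nonempty
  else
    let mid : Nat := ts.length / 2                                        -- len(ts) // 2
    let left := PySem.List.slice ts none (some (mid : Int))               -- ts[:mid]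
    tbaGo a s left ++ tbaGo a (s + left.sum) (PySem.List.slice ts (some (mid : Int)) none)  -- ts[mid:]
termination_by ts.length
decreasing_by
  · rw [PySem.List.slice_to_natCast]
    have : 2 ≤ ts.length := by
      have : ts.length ≠ 0 := by simpa using _h0
      omega
    simp only [List.length_take]; omega
  · rw [PySem.List.slice_from_natCast]
    have : 2 ≤ ts.length := by
      have : ts.length ≠ 0 := by simpa using _h0
      omega
    simp only [List.length_drop]; omega

def trials_by_animal_alt (a : List Int) (TRIALS : List Int) : List (List Int) :=
  tbaGo a 0 TRIALS

-- ===== PRECONDITION & SPEC =====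
def Spec_trials_by_animal (a : List Int) (TRIALS : List Int) (out : List (List Int)) : Prop := out = trials_by_animal_alt a TRIALS
instance (a : List Int) (TRIALS : List Int) (out : List (List Int)) : Decidable (Spec_trials_by_animal a TRIALS out) := by unfold Spec_trials_by_animal; infer_instance

-- ===== CLAIM (what is proved, stated in full; the proofs are below) =====
def Claim_equal_trials_by_animal : Prop := ∀ (a : List Int) (TRIALS : List Int), Dom_trials_by_animal a TRIALS → Spec_trials_by_animal a TRIALS (trials_by_animal a TRIALS)

-- ===== LEMMAS AND PROOFS =====

/-- The common chunk list: consecutive slices of `a` starting at offset `s`. -/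
def pvChunks (a : List Int) : Int → List Int → List (List Int)
  | _, [] => []
  | s, t :: ts => PySem.List.slice a (some s) (some (s + t)) :: pvChunks a (s + t) ts

theorem pvFoldA (a : List Int) (ts : List Int) (st : Int × Int × List (List Int)) :
    (ts.foldl (fun (st : Int × Int × List (List Int)) t =>
        (st.2.1, st.2.1 + t, st.2.2 ++ [PySem.List.slice a (some st.2.1) (some (st.2.1 + t))])) st).2.2
      = st.2.2 ++ pvChunks a st.2.1 ts := by
  induction ts generalizing st with
  | nil => simp [pvChunks]
  | cons t ts ih => simp [pvChunks, ih]

theorem pvChunks_append (a : List Int) (l r : List Int) (s : Int) :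
    pvChunks a s (l ++ r) = pvChunks a s l ++ pvChunks a (s + l.sum) r := by
  induction l generalizing s with
  | nil => simp [pvChunks]
  | cons t l ih => simp [pvChunks, ih, add_assoc]

theorem pvAltChunks (a : List Int) (s : Int) (ts : List Int) :
    tbaGo a s ts = pvChunks a s ts := by
  induction hn : ts.length using Nat.strong_induction_on generalizing ts s with
  | _ n ih =>
  rw [tbaGo]
  by_cases h0 : ts = []
  · subst h0; simp [pvChunks]
  rw [dif_neg h0]
  by_cases h1 : ts.length = 1
  · obtain ⟨t, rfl⟩ : ∃ t, ts = [t] := by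
      cases ts with
      | nil => simp at h1
      | cons t u => exact ⟨t, by simp at h1; simp [h1]⟩
    simp [pvChunks, PySem.List.pyGetD, PySem.List.pyGet?, PySem.List.pyIdx?]
  rw [dif_neg h1]
  have h2 : 2 ≤ ts.length := by
    have : ts.length ≠ 0 := by simpa using h0
    omega
  simp only [PySem.List.slice_to_natCast, PySem.List.slice_from_natCast]
  subst hn
  rw [ih (ts.take (ts.length / 2)).length (by simp; omega) _ _ rfl,
      ih (ts.drop (ts.length / 2)).length (by simp; omega) _ _ rfl]
  rw [← pvChunks_append a _ _ s, List.take_append_drop]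

-- ===== VERDICT (by name: the statement is the Claim_ definition above) =====
theorem trials_by_animal_spec : Claim_equal_trials_by_animal := by
  intro a TRIALS _
  unfold Spec_trials_by_animal trials_by_animal
  simp only []
  rw [PySem.List.foldl_pyRange_zero_pyGetD' TRIALS (0:Int)
        (fun (st : Int × Int × List (List Int)) t =>
          (st.2.1, st.2.1 + t, st.2.2 ++ [PySem.List.slice a (some st.2.1) (some (st.2.1 + t))]))
        ((0:Int), (0:Int), ([] : List (List Int)))]
  rw [pvFoldA a TRIALS ((0:Int), (0:Int), ([] : List (List Int)))]
  rw [show trials_by_animal_alt a TRIALS = tbaGo a 0 TRIALS from rfl, pvAltChunks a 0 TRIALS]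
  simp
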